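-- pv_equiv track=rewrite | github.com/yu0809/Django-Chat | firewall/firewall/rules.py | _match_port
-- ===== SOURCE A (Python) =====
-- from typing import Optional, Pattern
--
-- def _match_port(value: int, condition: Optional[str]) -> bool:
--     """根据字符串条件匹配端口。
--
--     支持格式：
--     - ``None`` 或 ``"*"`` 表示任意端口；
--     - 单个端口（例如 ``"80"``）；
--     - 端口范围 ``"8000-8100"``；
--     - 多个端口使用逗号分隔 ``"80,443"``。
--     """
--
--     if not condition or condition in {"*", "any", "ANY"}:
--         return True
--     for token in (part.strip() for part in condition.split(",")):
--         if "-" in token: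
--             start, _, end = token.partition("-")
--             if start.isdigit() and end.isdigit():
--                 if int(start) <= value <= int(end):
--                     return True
--         elif token.isdigit():
--             if value == int(token):
--                 return True
--     return False
-- ===== SOURCE B (Python) =====
-- def _match_port(value, condition):
--     if not condition or condition in {"*", "any", "ANY"}:
--         return True
--     # One-pass character-level state machine over condition + "," (no split/strip/partition):
--     # q0 before a number, q1 in first number, q2 after first number, q3 just after '-',
--     # q4 in second number, q5 after second number, q6 garbage token (skip to next comma).
--     q = 0
--     lo = []
--     hi = []
--     found = False
--     for ch in condition + ",":
--         if q == 0:
--             if ch.isspace():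
--                 pass
--             elif ch.isdigit():
--                 lo = [ch]
--                 q = 1
--             elif ch == ",":
--                 pass
--             else:
--                 q = 6
--         elif q == 1:
--             if ch.isdigit():
--                 lo.append(ch)
--             elif ch.isspace():
--                 q = 2
--             elif ch == "-":
--                 q = 3
--             elif ch == ",":
--                 found = found or value == int("".join(lo))
--                 q = 0
--             else:
--                 q = 6
--         elif q == 2:
--             if ch.isspace():
--                 pass
--             elif ch == ",":
--                 found = found or value == int("".join(lo))
--                 q = 0
--             else:
--                 q = 6
--         elif q == 3:
--             if ch.isdigit():
--                 hi = [ch]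
--                 q = 4
--             elif ch == ",":
--                 q = 0
--             else:
--                 q = 6
--         elif q == 4:
--             if ch.isdigit():
--                 hi.append(ch)
--             elif ch.isspace():
--                 q = 5
--             elif ch == ",":
--                 found = found or int("".join(lo)) <= value <= int("".join(hi))
--                 q = 0
--             else:
--                 q = 6
--         elif q == 5:
--             if ch.isspace():
--                 pass
--             elif ch == ",":
--                 found = found or int("".join(lo)) <= value <= int("".join(hi))
--                 q = 0
--             else:
--                 q = 6
--         else:
--             if ch == ",":
--                 q = 0
--     return found
-- ===== Notes on version B (the rewrite author's own statement) =====
-- stated objective: alternative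
-- what changed: B replaces A's split/strip/partition/isdigit token pipeline by a single character-level finite state machine that scans condition+"," once, buffering digit runs and testing a match at each comma.
import Mathlib
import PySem

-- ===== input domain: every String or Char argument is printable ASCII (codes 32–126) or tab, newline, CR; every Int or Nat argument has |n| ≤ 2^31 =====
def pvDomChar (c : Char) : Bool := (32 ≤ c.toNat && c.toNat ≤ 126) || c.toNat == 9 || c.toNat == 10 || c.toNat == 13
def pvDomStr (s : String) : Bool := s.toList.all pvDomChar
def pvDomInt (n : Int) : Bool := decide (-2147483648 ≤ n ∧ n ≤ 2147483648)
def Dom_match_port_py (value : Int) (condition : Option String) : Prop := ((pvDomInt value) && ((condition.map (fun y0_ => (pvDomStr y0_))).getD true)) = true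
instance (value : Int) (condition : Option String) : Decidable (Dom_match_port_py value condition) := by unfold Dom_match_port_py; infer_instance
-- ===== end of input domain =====

-- B replaces A's split/strip/partition/isdigit token pipeline by a single character-level
-- state machine over condition+","; equivalence is proved on all inputs (alternative algorithm).

-- ===== PORT A =====
-- hand port of token.partition("-") (split at the FIRST '-'; exact: if no '-' the whole
-- string is the first component and the third is empty, as in Python)
def pyPartitionDash : List Char → List Char × List Char
  | [] => ([], [])
  | c :: rest =>
      if c = '-' then ([], rest)
      else
        let p := pyPartitionDash rest
        (c :: p.1, p.2)

def matchPortLoop (value : Int) : List String → Bool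
  | [] => false
  | part :: rest =>
      let token := PySem.Str.strip part
      if PySem.Str.isIn "-" token then
        let p := pyPartitionDash token.toList
        if PySem.Chars.strIsdigit p.1 && PySem.Chars.strIsdigit p.2 then
          if ((PySem.Int.ofChars? p.1).getD 0 ≤ value ∧ value ≤ (PySem.Int.ofChars? p.2).getD 0 : Bool) then
            true
          else matchPortLoop value rest
        else matchPortLoop value rest
      else if PySem.Str.strIsdigit token then
        if value = (PySem.Int.ofChars? token.toList).getD 0 then true
        else matchPortLoop value rest
      else matchPortLoop value rest

def match_port_py (value : Int) (condition : Option String) : Bool :=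
  match condition with
  | none => true
  | some c =>
      if c = "" || c = "*" || c = "any" || c = "ANY" then true
      else matchPortLoop value ((PySem.Str.split? c ",").getD [])

-- ===== PORT B =====
-- the DFA state: q ∈ {0..6}; lo/hi buffer the digit characters of the two numbers
structure BSt where
  q : Nat
  lo : List Char
  hi : List Char
  found : Bool
deriving Repr, DecidableEq

-- int("".join(buf)) (buf is a nonempty digit run wherever B converts it)
def bInt (cs : List Char) : Int := (PySem.Int.ofChars? cs).getD 0

def stepB (value : Int) (s : BSt) (ch : Char) : BSt :=
  if s.q = 0 then
    if PySem.Chars.isspace ch then s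
    else if PySem.Chars.isdigit ch then { s with q := 1, lo := [ch] }
    else if ch = ',' then s
    else { s with q := 6 }
  else if s.q = 1 then
    if PySem.Chars.isdigit ch then { s with lo := s.lo ++ [ch] }
    else if PySem.Chars.isspace ch then { s with q := 2 }
    else if ch = '-' then { s with q := 3 }
    else if ch = ',' then { s with q := 0, found := s.found || decide (value = bInt s.lo) }
    else { s with q := 6 }
  else if s.q = 2 then
    if PySem.Chars.isspace ch then s
    else if ch = ',' then { s with q := 0, found := s.found || decide (value = bInt s.lo) }
    else { s with q := 6 }
  else if s.q = 3 then
    if PySem.Chars.isdigit ch then { s with q := 4, hi := [ch] }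
    else if ch = ',' then { s with q := 0 }
    else { s with q := 6 }
  else if s.q = 4 then
    if PySem.Chars.isdigit ch then { s with hi := s.hi ++ [ch] }
    else if PySem.Chars.isspace ch then { s with q := 5 }
    else if ch = ',' then { s with q := 0, found := s.found || (decide (bInt s.lo ≤ value) && decide (value ≤ bInt s.hi)) }
    else { s with q := 6 }
  else if s.q = 5 then
    if PySem.Chars.isspace ch then s
    else if ch = ',' then { s with q := 0, found := s.found || (decide (bInt s.lo ≤ value) && decide (value ≤ bInt s.hi)) }
    else { s with q := 6 }
  else
    if ch = ',' then { s with q := 0 } else s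

def match_port_py_alt (value : Int) (condition : Option String) : Bool :=
  match condition with
  | none => true
  | some c =>
      if c = "" || c = "*" || c = "any" || c = "ANY" then true
      else ((c.toList ++ [',']).foldl (stepB value) ⟨0, [], [], false⟩).found

-- ===== PRECONDITION & SPEC =====
def Spec_match_port_py (value : Int) (condition : Option String) (out : Bool) : Prop := out = match_port_py_alt value condition
instance (value : Int) (condition : Option String) (out : Bool) : Decidable (Spec_match_port_py value condition out) := by unfold Spec_match_port_py; infer_instance

-- ===== CLAIM (what is proved, stated in full; the proofs are below) =====
def Claim_equal_match_port_py : Prop := ∀ (value : Int) (condition : Option String), Dom_match_port_py value condition → Spec_match_port_py value condition (match_port_py value condition)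

-- ===== LEMMAS AND PROOFS =====

-- A's per-token test, at the character level
def tokM (v : Int) (t : List Char) : Bool :=
  let u := PySem.Chars.strip t
  if PySem.Chars.isIn ['-'] u then
    let p := pyPartitionDash u
    if PySem.Chars.strIsdigit p.1 && PySem.Chars.strIsdigit p.2 then
      decide ((PySem.Int.ofChars? p.1).getD 0 ≤ v) && decide (v ≤ (PySem.Int.ofChars? p.2).getD 0)
    else false
  else if PySem.Chars.strIsdigit u then decide (v = (PySem.Int.ofChars? u).getD 0) else false

-- split on ',' with an accumulator (reference form of PySem.Chars.splitOn with sep ",")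
def splitAcc (cur : List Char) : List Char → List (List Char)
  | [] => [cur.reverse]
  | c :: rest => if c = ',' then cur.reverse :: splitAcc [] rest else splitAcc (c :: cur) rest

-- ---- character facts ----
theorem digit_bounds (c : Char) (h : PySem.Chars.isdigit c = true) : 48 ≤ c.toNat ∧ c.toNat ≤ 57 := by
  simp [PySem.Chars.isdigit, Char.le_def] at h
  exact ⟨UInt32.le_iff_toNat_le.mp h.1, UInt32.le_iff_toNat_le.mp h.2⟩

theorem digit_not_space (c : Char) (h : PySem.Chars.isdigit c = true) : PySem.Chars.isspace c = false := by
  obtain ⟨a1, a2⟩ := digit_bounds c h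
  simp only [PySem.Chars.isspace]
  simp only [Bool.or_eq_false_iff, Bool.and_eq_false_iff, decide_eq_false_iff_not]
  omega

theorem digit_ne_dash (c : Char) (h : PySem.Chars.isdigit c = true) : c ≠ '-' := by
  intro rfl_; subst rfl_
  obtain ⟨a1, _⟩ := digit_bounds _ h
  simp [Char.toNat] at a1

-- ---- rstrip facts ----
theorem rstrip_eq_nil_iff (l : List Char) :
    PySem.Chars.rstrip l = [] ↔ ∀ c ∈ l, PySem.Chars.isspace c = true := by
  simp [PySem.Chars.rstrip, List.dropWhile_eq_nil_iff]

theorem rstrip_append_ws (xs ys : List Char) (h : ∀ c ∈ ys, PySem.Chars.isspace c = true) :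
    PySem.Chars.rstrip (xs ++ ys) = PySem.Chars.rstrip xs := by
  simp only [PySem.Chars.rstrip, List.reverse_append]
  rw [List.dropWhile_append]
  have hz : ys.reverse.dropWhile PySem.Chars.isspace = [] := by
    simp [List.dropWhile_eq_nil_iff]; exact fun c hc => h c hc
  simp [hz]

theorem rstrip_append_ne (xs ys : List Char) (h : PySem.Chars.rstrip ys ≠ []) :
    PySem.Chars.rstrip (xs ++ ys) = xs ++ PySem.Chars.rstrip ys := by
  simp only [PySem.Chars.rstrip, List.reverse_append]
  rw [List.dropWhile_append]
  have h2 : (ys.reverse.dropWhile PySem.Chars.isspace).isEmpty = false := by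
    rw [List.isEmpty_eq_false_iff]
    intro hh
    exact h (by simp [PySem.Chars.rstrip, hh])
  simp [h2]

theorem rstrip_of_nonws (l : List Char) (h : ∀ c ∈ l, PySem.Chars.isspace c = false) :
    PySem.Chars.rstrip l = l := by
  simp only [PySem.Chars.rstrip]
  rw [List.dropWhile_eq_self_iff.mpr]
  · simp
  · intro hne
    have hm : l.reverse[0] ∈ l := by
      have := List.getElem_mem hne
      exact (List.mem_reverse).mp this
    rw [h _ hm]
    simp

theorem rstrip_cons_of_ne (y : Char) (l : List Char) (h : PySem.Chars.rstrip (y :: l) ≠ []) :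
    PySem.Chars.rstrip (y :: l) = y :: PySem.Chars.rstrip l := by
  by_cases hl : PySem.Chars.rstrip l = []
  · have hws : ∀ c ∈ l, PySem.Chars.isspace c = true := (rstrip_eq_nil_iff l).mp hl
    rw [show (y :: l) = [y] ++ l by rfl, rstrip_append_ws [y] l hws] at *
    by_cases hy : PySem.Chars.isspace y = true
    · exfalso; exact h ((rstrip_eq_nil_iff [y]).mpr (by simpa using hy))
    · rw [hl]
      exact rstrip_of_nonws [y] (by simpa using hy)
  · exact rstrip_append_ne [y] l hl

-- ---- partition facts ----
theorem partition_append (pre suf : List Char) (h : '-' ∉ pre) :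
    pyPartitionDash (pre ++ suf) = (pre ++ (pyPartitionDash suf).1, (pyPartitionDash suf).2) := by
  induction pre with
  | nil => simp
  | cons c rest ih =>
      simp only [List.mem_cons, not_or] at h
      simp [pyPartitionDash, Ne.symm h.1, ih h.2]

-- ---- isIn / strIsdigit facts ----
theorem isIn_dash_true (t : List Char) (h : '-' ∈ t) : PySem.Chars.isIn ['-'] t = true :=
  (PySem.Chars.isIn_iff_infix ['-'] t).mpr ((List.singleton_infix_iff _ _).mpr h)

theorem isIn_dash_false (t : List Char) (h : '-' ∉ t) : PySem.Chars.isIn ['-'] t = false :=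
  (PySem.Chars.isIn_eq_false_iff ['-'] t).mpr (fun hi => h ((List.singleton_infix_iff _ _).mp hi))

theorem strIsdigit_all (l : List Char) (h0 : l ≠ []) (h : ∀ c ∈ l, PySem.Chars.isdigit c = true) :
    PySem.Chars.strIsdigit l = true := by
  simp only [PySem.Chars.strIsdigit, List.all_eq_true, Bool.and_eq_true, Bool.not_eq_eq_eq_not]
  exact ⟨by simp [List.isEmpty_eq_false_iff, h0], fun x hx => h x hx⟩

theorem strIsdigit_false_of_mem (x : Char) (l : List Char) (hx : x ∈ l)
    (h : PySem.Chars.isdigit x = false) : PySem.Chars.strIsdigit l = false := by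
  simp only [PySem.Chars.strIsdigit, Bool.and_eq_false_iff]
  right
  simp only [List.all_eq_false]
  exact ⟨x, hx, by simp [h]⟩

-- ---- splitOn " , " equals splitAcc ----
theorem go_spec : ∀ (fuel : Nat) (l cur : List Char) (acc : List (List Char)), l.length < fuel →
    PySem.Chars.splitOn.go [','] fuel l cur acc = acc.reverse ++ splitAcc cur l := by
  intro fuel
  induction fuel with
  | zero => intro l cur acc h; omega
  | succ n ih =>
      intro l cur acc h
      cases l with
      | nil =>
          rw [PySem.Chars.splitOn.go]
          simp [splitAcc]
          omega
      | cons c rest =>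
          rw [PySem.Chars.splitOn.go]
          by_cases hc : c = ','
          · subst hc
            rw [if_pos (by simp [List.isPrefixOf])]
            have hrec := ih rest [] (cur.reverse :: acc) (by simp at h ⊢; omega)
            simp only [List.length_cons, List.length_nil, Nat.zero_add, List.drop_succ_cons,
              List.drop_zero] at hrec ⊢
            rw [hrec]
            simp [splitAcc]
          · rw [if_neg (by simp [List.isPrefixOf, Ne.symm hc])]
            rw [ih rest (c :: cur) acc (by simp at h ⊢; omega)]
            simp [splitAcc, hc]

theorem splitOn_comma (cs : List Char) : PySem.Chars.splitOn cs [','] = splitAcc [] cs := by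
  have := go_spec (cs.length + 1) cs [] [] (by omega)
  simpa [PySem.Chars.splitOn] using this

theorem splitAcc_no_comma (p : List Char) (h : ',' ∉ p) : ∀ cur, splitAcc cur p = [cur.reverse ++ p] := by
  induction p with
  | nil => intro cur; simp [splitAcc]
  | cons c rest ih =>
      intro cur
      simp only [List.mem_cons, not_or] at h
      simp only [splitAcc, if_neg (Ne.symm h.1), ih h.2, List.reverse_cons, List.append_assoc,
        List.singleton_append]

theorem splitAcc_append (p q : List Char) (h : ',' ∉ p) :
    ∀ cur, splitAcc cur (p ++ ',' :: q) = (cur.reverse ++ p) :: splitAcc [] q := by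
  induction p with
  | nil => intro cur; simp [splitAcc]
  | cons c rest ih =>
      intro cur
      simp only [List.mem_cons, not_or] at h
      simp only [List.cons_append, splitAcc, if_neg (Ne.symm h.1), ih h.2, List.reverse_cons,
        List.append_assoc]
      simp

-- ---- A's loop is an any of tokM ----
theorem loopA (v : Int) : ∀ ss : List String,
    matchPortLoop v ss = ss.any (fun s => tokM v s.toList) := by
  intro ss
  induction ss with
  | nil => rfl
  | cons part rest ih =>
      simp only [matchPortLoop, List.any_cons]
      rw [ih]
      simp only [tokM]
      simp only [PySem.Str.isIn_eq, PySem.Str.toList_strip, PySem.Str.strIsdigit_eq]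
      have hd : "-".toList = ['-'] := by decide
      rw [hd]
      split_ifs with h1 h2 h3 h4 h5 <;> simp_all

-- ---- DFA run lemmas ----
theorem q0_ws (v : Int) : ∀ (w : List Char) (lo hi : List Char) (f : Bool),
    (∀ c ∈ w, PySem.Chars.isspace c = true) →
    w.foldl (stepB v) ⟨0, lo, hi, f⟩ = ⟨0, lo, hi, f⟩ := by
  intro w
  induction w with
  | nil => intro lo hi f _; rfl
  | cons c rest ih =>
      intro lo hi f h
      have hc := h c (by simp)
      simp only [List.foldl_cons]
      rw [show stepB v ⟨0, lo, hi, f⟩ c = ⟨0, lo, hi, f⟩ by simp [stepB, hc]]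
      exact ih lo hi f (fun x hx => h x (by simp [hx]))

theorem q2_ws (v : Int) : ∀ (w : List Char) (lo hi : List Char) (f : Bool),
    (∀ c ∈ w, PySem.Chars.isspace c = true) →
    w.foldl (stepB v) ⟨2, lo, hi, f⟩ = ⟨2, lo, hi, f⟩ := by
  intro w
  induction w with
  | nil => intro lo hi f _; rfl
  | cons c rest ih =>
      intro lo hi f h
      have hc := h c (by simp)
      simp only [List.foldl_cons]
      rw [show stepB v ⟨2, lo, hi, f⟩ c = ⟨2, lo, hi, f⟩ by simp [stepB, hc]]
      exact ih lo hi f (fun x hx => h x (by simp [hx]))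

theorem q5_ws (v : Int) : ∀ (w : List Char) (lo hi : List Char) (f : Bool),
    (∀ c ∈ w, PySem.Chars.isspace c = true) →
    w.foldl (stepB v) ⟨5, lo, hi, f⟩ = ⟨5, lo, hi, f⟩ := by
  intro w
  induction w with
  | nil => intro lo hi f _; rfl
  | cons c rest ih =>
      intro lo hi f h
      have hc := h c (by simp)
      simp only [List.foldl_cons]
      rw [show stepB v ⟨5, lo, hi, f⟩ c = ⟨5, lo, hi, f⟩ by simp [stepB, hc]]
      exact ih lo hi f (fun x hx => h x (by simp [hx]))

theorem q1_digits (v : Int) : ∀ (d : List Char) (lo hi : List Char) (f : Bool),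
    (∀ c ∈ d, PySem.Chars.isdigit c = true) →
    d.foldl (stepB v) ⟨1, lo, hi, f⟩ = ⟨1, lo ++ d, hi, f⟩ := by
  intro d
  induction d with
  | nil => intro lo hi f _; simp
  | cons c rest ih =>
      intro lo hi f h
      have hc := h c (by simp)
      simp only [List.foldl_cons]
      rw [show stepB v ⟨1, lo, hi, f⟩ c = ⟨1, lo ++ [c], hi, f⟩ by simp [stepB, hc]]
      rw [ih (lo ++ [c]) hi f (fun x hx => h x (by simp [hx]))]
      simp

theorem q4_digits (v : Int) : ∀ (d : List Char) (lo hi : List Char) (f : Bool),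
    (∀ c ∈ d, PySem.Chars.isdigit c = true) →
    d.foldl (stepB v) ⟨4, lo, hi, f⟩ = ⟨4, lo, hi ++ d, f⟩ := by
  intro d
  induction d with
  | nil => intro lo hi f _; simp
  | cons c rest ih =>
      intro lo hi f h
      have hc := h c (by simp)
      simp only [List.foldl_cons]
      rw [show stepB v ⟨4, lo, hi, f⟩ c = ⟨4, lo, hi ++ [c], f⟩ by simp [stepB, hc]]
      rw [ih lo (hi ++ [c]) f (fun x hx => h x (by simp [hx]))]
      simp

theorem q6_absorb (v : Int) : ∀ (l : List Char) (lo hi : List Char) (f : Bool),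
    ',' ∉ l → l.foldl (stepB v) ⟨6, lo, hi, f⟩ = ⟨6, lo, hi, f⟩ := by
  intro l
  induction l with
  | nil => intro lo hi f _; rfl
  | cons c rest ih =>
      intro lo hi f h
      simp only [List.mem_cons, not_or] at h
      simp only [List.foldl_cons]
      rw [show stepB v ⟨6, lo, hi, f⟩ c = ⟨6, lo, hi, f⟩ by simp [stepB, Ne.symm h.1]]
      exact ih lo hi f h.2

-- ---- helper facts for the per-segment theorem ----
theorem dropWhile_head_false (p : Char → Bool) (l : List Char) (c : Char) (r : List Char)
    (h : l.dropWhile p = c :: r) : p c = false := by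
  have h1 : l.dropWhile p ≠ [] := by simp [h]
  have h2 := List.head_dropWhile_not p h1
  have h3 : (l.dropWhile p).head h1 = c := by simp [h]
  rwa [h3] at h2

-- garbage run: from state 6 a comma-free tail followed by ',' lands back in state 0
theorem runQ6 (v : Int) (l : List Char) (h : ',' ∉ l) (lo hi : List Char) (f : Bool) :
    ((l ++ [',']).foldl (stepB v) ⟨6, lo, hi, f⟩) = ⟨0, lo, hi, f⟩ := by
  rw [List.foldl_append, q6_absorb v l lo hi f h]
  simp [stepB]

-- A's token test on an already-stripped-on-the-left list
def tokCoreT (v : Int) (t : List Char) : Bool :=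
  if PySem.Chars.isIn ['-'] t then
    let p := pyPartitionDash t
    if PySem.Chars.strIsdigit p.1 && PySem.Chars.strIsdigit p.2 then
      decide ((PySem.Int.ofChars? p.1).getD 0 ≤ v) && decide (v ≤ (PySem.Int.ofChars? p.2).getD 0)
    else false
  else if PySem.Chars.strIsdigit t then decide (v = (PySem.Int.ofChars? t).getD 0) else false

theorem tokM_eq_tokCoreT (v : Int) (seg : List Char) :
    tokM v seg = tokCoreT v (PySem.Chars.rstrip (seg.dropWhile PySem.Chars.isspace)) := by
  rfl

-- a non-digit, non-dash character before the first dash kills the token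
theorem tokCoreT_false_left (v : Int) (pre suf : List Char) (x : Char)
    (hpre : '-' ∉ pre) (hxd : PySem.Chars.isdigit x = false) (hxdash : x ≠ '-') :
    tokCoreT v (pre ++ x :: suf) = false := by
  by_cases hdash : '-' ∈ pre ++ x :: suf
  · rw [tokCoreT, if_pos (isIn_dash_true _ hdash)]
    have hp : pyPartitionDash (pre ++ x :: suf)
        = (pre ++ (pyPartitionDash (x :: suf)).1, (pyPartitionDash (x :: suf)).2) :=
      partition_append pre (x :: suf) hpre
    have hx1 : pyPartitionDash (x :: suf) = (x :: (pyPartitionDash suf).1, (pyPartitionDash suf).2) := by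
      simp [pyPartitionDash, hxdash]
    rw [hp, hx1]
    have : PySem.Chars.strIsdigit (pre ++ x :: (pyPartitionDash suf).1) = false :=
      strIsdigit_false_of_mem x _ (by simp) hxd
    simp [this]
  · rw [tokCoreT, if_neg (by simp [isIn_dash_false _ hdash])]
    rw [strIsdigit_false_of_mem x _ (by simp) hxd]
    simp

-- a dash whose right-hand side is not a digit string kills the token
theorem tokCoreT_false_right (v : Int) (pre suf : List Char)
    (hpre : '-' ∉ pre) (hsuf : PySem.Chars.strIsdigit suf = false) :
    tokCoreT v (pre ++ '-' :: suf) = false := by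
  rw [tokCoreT, if_pos (isIn_dash_true _ (by simp))]
  have hp : pyPartitionDash (pre ++ '-' :: suf) = (pre, suf) := by
    rw [partition_append pre _ hpre]
    simp [pyPartitionDash]
  rw [hp]
  simp [hsuf]

-- the two successful shapes
theorem tokCoreT_single (v : Int) (t : List Char) (h0 : t ≠ [])
    (h : ∀ c ∈ t, PySem.Chars.isdigit c = true) :
    tokCoreT v t = decide (v = (PySem.Int.ofChars? t).getD 0) := by
  have hdash : '-' ∉ t := fun hm => by simpa using digit_ne_dash '-' (h _ hm)
  rw [tokCoreT, if_neg (by simp [isIn_dash_false _ hdash])]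
  rw [strIsdigit_all t h0 h]
  simp

theorem tokCoreT_range (v : Int) (a b : List Char) (ha0 : a ≠ []) (hb0 : b ≠ [])
    (ha : ∀ c ∈ a, PySem.Chars.isdigit c = true) (hb : ∀ c ∈ b, PySem.Chars.isdigit c = true) :
    tokCoreT v (a ++ '-' :: b)
      = (decide ((PySem.Int.ofChars? a).getD 0 ≤ v) && decide (v ≤ (PySem.Int.ofChars? b).getD 0)) := by
  have hdasha : '-' ∉ a := fun hm => by simpa using digit_ne_dash '-' (ha _ hm)
  rw [tokCoreT, if_pos (isIn_dash_true _ (by simp))]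
  have hp : pyPartitionDash (a ++ '-' :: b) = (a, b) := by
    rw [partition_append a _ hdasha]
    simp [pyPartitionDash]
  rw [hp]
  simp only []
  rw [if_pos (by rw [strIsdigit_all a ha0 ha, strIsdigit_all b hb0 hb]; rfl)]

-- ---- the per-segment theorem core: DFA over one comma-free left-stripped segment ----
theorem perSegCore (v : Int) (u : List Char) (hcomma : ',' ∉ u)
    (hhead : ∀ c R, u = c :: R → PySem.Chars.isspace c = false) :
    ∀ (lo hi : List Char) (f : Bool), ∃ lo' hi',
      (u ++ [',']).foldl (stepB v) ⟨0, lo, hi, f⟩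
        = ⟨0, lo', hi', f || tokCoreT v (PySem.Chars.rstrip u)⟩ := by
  intro lo hi f
  have cws : PySem.Chars.isspace ',' = false := by decide
  have cdg : PySem.Chars.isdigit ',' = false := by decide
  have cdash : (',' : Char) ≠ '-' := by decide
  have dashd : PySem.Chars.isdigit '-' = false := by decide
  have dashws : PySem.Chars.isspace '-' = false := by decide
  cases u with
  | nil =>
      refine ⟨lo, hi, ?_⟩
      have hstep : stepB v ⟨0, lo, hi, f⟩ ',' = ⟨0, lo, hi, f⟩ := by
        simp [stepB, cws, cdg]
        try rfl
      have htok : tokCoreT v (PySem.Chars.rstrip []) = false := by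
        simp [PySem.Chars.rstrip, tokCoreT,
          show PySem.Chars.isIn ['-'] ([] : List Char) = false from by decide,
          PySem.Chars.strIsdigit]
      simp [hstep, htok]
  | cons c R =>
      have hcws : PySem.Chars.isspace c = false := hhead c R rfl
      simp only [List.mem_cons, not_or] at hcomma
      obtain ⟨hcc, hRc⟩ := hcomma
      have hcne : c ≠ ',' := Ne.symm hcc
      have hrne : PySem.Chars.rstrip (c :: R) ≠ [] := by
        rw [Ne, rstrip_eq_nil_iff]
        intro hall
        exact absurd (hall c (by simp)) (by simp [hcws])
      by_cases hcd : PySem.Chars.isdigit c = true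
      · -- head is a digit: enter state 1
        have hds : ∀ x ∈ R.takeWhile PySem.Chars.isdigit, PySem.Chars.isdigit x = true :=
          fun x hx => List.mem_takeWhile_imp hx
        have hstep0 : stepB v ⟨0, lo, hi, f⟩ c = ⟨1, [c], hi, f⟩ := by
          simp [stepB, hcws, hcd]
          try rfl
        have hR2c : ',' ∉ R.dropWhile PySem.Chars.isdigit :=
          fun hm => hRc ((List.dropWhile_sublist _).subset hm)
        have hpredash : '-' ∉ c :: R.takeWhile PySem.Chars.isdigit := by
          intro hm
          rcases List.mem_cons.mp hm with h1 | h1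
          · exact absurd hcd (by rw [← h1, dashd]; simp)
          · exact absurd (hds _ h1) (by simp [dashd])
        have hbufws : ∀ x ∈ c :: R.takeWhile PySem.Chars.isdigit, PySem.Chars.isspace x = false := by
          intro x hx
          rcases List.mem_cons.mp hx with rfl | hx
          · exact hcws
          · exact digit_not_space x (hds x hx)
        have hbufd : ∀ x ∈ c :: R.takeWhile PySem.Chars.isdigit, PySem.Chars.isdigit x = true := by
          intro x hx
          rcases List.mem_cons.mp hx with rfl | hx
          · exact hcd
          · exact hds x hx
        cases hR2 : R.dropWhile PySem.Chars.isdigit with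
        | nil =>
            -- the whole segment is one digit run: single-port match
            have hRall : R.takeWhile PySem.Chars.isdigit = R := by
              conv_rhs => rw [← List.takeWhile_append_dropWhile (p := PySem.Chars.isdigit) (l := R)]
              rw [hR2, List.append_nil]
            have hb1 := hbufws
            have hb2 := hbufd
            rw [hRall] at hb1 hb2
            have htok : tokCoreT v (PySem.Chars.rstrip (c :: R))
                = decide (v = bInt (c :: R.takeWhile PySem.Chars.isdigit)) := by
              rw [hRall, rstrip_of_nonws _ hb1, tokCoreT_single v (c :: R) (by simp) hb2]
              rfl
            refine ⟨c :: R, hi, ?_⟩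
            rw [htok]
            have hlist : (c :: R) ++ [','] = [c] ++ (R.takeWhile PySem.Chars.isdigit ++ [',']) := by
              conv_lhs => rw [← hRall]
              simp
            rw [hlist]
            simp only [List.foldl_append, List.foldl_cons, List.foldl_nil, hstep0]
            rw [q1_digits v _ [c] hi f hds]
            simp [stepB, cdg, cws, cdash, hRall]
            try rfl
        | cons e R3 =>
            have hed : PySem.Chars.isdigit e = false := dropWhile_head_false _ R e R3 hR2
            have heR : e ∈ R := (List.dropWhile_sublist _).subset (by rw [hR2]; simp)
            have hec : e ≠ ',' := fun h => hRc (h ▸ heR)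
            have hR3c : ',' ∉ R3 := fun hm => hR2c (by rw [hR2]; simp [hm])
            have hRsplit : R = R.takeWhile PySem.Chars.isdigit ++ e :: R3 := by
              conv_lhs => rw [← List.takeWhile_append_dropWhile (p := PySem.Chars.isdigit) (l := R)]
              rw [hR2]
            by_cases hews : PySem.Chars.isspace e = true
            · -- whitespace after the first number: state 2
              have hstep1 : stepB v ⟨1, [c] ++ R.takeWhile PySem.Chars.isdigit, hi, f⟩ e
                  = ⟨2, [c] ++ R.takeWhile PySem.Chars.isdigit, hi, f⟩ := by
                simp [stepB, hed, hews]
                try rfl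
              have hw2 : ∀ x ∈ R3.takeWhile PySem.Chars.isspace, PySem.Chars.isspace x = true :=
                fun x hx => List.mem_takeWhile_imp hx
              have hR4c : ',' ∉ R3.dropWhile PySem.Chars.isspace :=
                fun hm => hR3c ((List.dropWhile_sublist _).subset hm)
              cases hR4 : R3.dropWhile PySem.Chars.isspace with
              | nil =>
                  -- only trailing whitespace: single-port match
                  have hR3all : R3.takeWhile PySem.Chars.isspace = R3 := by
                    conv_rhs => rw [← List.takeWhile_append_dropWhile (p := PySem.Chars.isspace) (l := R3)]
                    rw [hR4, List.append_nil]
                  have hR3ws : ∀ x ∈ R3, PySem.Chars.isspace x = true := by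
                    rw [← hR3all]; exact hw2
                  have htok : tokCoreT v (PySem.Chars.rstrip (c :: R))
                      = decide (v = bInt (c :: R.takeWhile PySem.Chars.isdigit)) := by
                    rw [show c :: R = (c :: R.takeWhile PySem.Chars.isdigit) ++ (e :: R3) by
                      conv_lhs => rw [hRsplit]
                      simp]
                    rw [rstrip_append_ws _ _ (by
                      intro x hx
                      rcases List.mem_cons.mp hx with rfl | hx
                      · exact hews
                      · exact hR3ws x hx)]
                    rw [rstrip_of_nonws _ hbufws]
                    rw [tokCoreT_single v _ (by simp) hbufd]
                    rfl
                  refine ⟨[c] ++ R.takeWhile PySem.Chars.isdigit, hi, ?_⟩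
                  rw [htok]
                  have hlist : (c :: R) ++ [','] = [c] ++ (R.takeWhile PySem.Chars.isdigit
                      ++ ([e] ++ (R3 ++ [',']))) := by
                    conv_lhs => rw [hRsplit]
                    simp
                  rw [hlist]
                  simp only [List.foldl_append, List.foldl_cons, List.foldl_nil, hstep0]
                  rw [q1_digits v _ [c] hi f hds, hstep1, q2_ws v R3 _ hi f hR3ws]
                  simp [stepB, cws]
                  try rfl
              | cons x R5 =>
                  -- junk after internal whitespace: dead token
                  have hxws : PySem.Chars.isspace x = false := dropWhile_head_false _ R3 x R5 hR4
                  have hxR3 : x ∈ R3 := (List.dropWhile_sublist _).subset (by rw [hR4]; simp)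
                  have hxc : x ≠ ',' := fun h => hR3c (h ▸ hxR3)
                  have hR5c : ',' ∉ R5 := fun hm => hR4c (by rw [hR4]; simp [hm])
                  have hR3split : R3 = R3.takeWhile PySem.Chars.isspace ++ x :: R5 := by
                    conv_lhs => rw [← List.takeWhile_append_dropWhile (p := PySem.Chars.isspace) (l := R3)]
                    rw [hR4]
                  have htok : tokCoreT v (PySem.Chars.rstrip (c :: R)) = false := by
                    rw [show c :: R = ((c :: R.takeWhile PySem.Chars.isdigit) ++ [e])
                        ++ (R3.takeWhile PySem.Chars.isspace ++ x :: R5) by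
                      conv_lhs => rw [hRsplit, hR3split]
                      simp]
                    rw [rstrip_append_ne _ _ (by
                      rw [Ne, rstrip_eq_nil_iff]
                      intro hall
                      exact absurd (hall x (by simp)) (by simp [hxws]))]
                    rw [List.append_assoc, List.singleton_append]
                    exact tokCoreT_false_left v _ _ e hpredash
                      hed (fun h => by rw [h] at hews; exact absurd hews (by simp [dashws]))
                  refine ⟨[c] ++ R.takeWhile PySem.Chars.isdigit, hi, ?_⟩
                  rw [htok]
                  have hlist : (c :: R) ++ [','] = [c] ++ (R.takeWhile PySem.Chars.isdigit
                      ++ ([e] ++ (R3.takeWhile PySem.Chars.isspace ++ ([x] ++ (R5 ++ [',']))))) := by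
                    conv_lhs => rw [hRsplit, hR3split]
                    simp
                  rw [hlist]
                  simp only [List.foldl_append, List.foldl_cons, List.foldl_nil, hstep0]
                  rw [q1_digits v _ [c] hi f hds, hstep1, q2_ws v _ _ hi f hw2]
                  rw [show stepB v ⟨2, [c] ++ R.takeWhile PySem.Chars.isdigit, hi, f⟩ x
                      = ⟨6, [c] ++ R.takeWhile PySem.Chars.isdigit, hi, f⟩ by
                    simp [stepB, hxws, hxc]]
                  rw [q6_absorb v R5 _ hi f hR5c]
                  simp [stepB]
                  try rfl
            · by_cases hedash : e = '-'
              · -- a dash after the first number: state 3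
                subst hedash
                have hstep1 : stepB v ⟨1, [c] ++ R.takeWhile PySem.Chars.isdigit, hi, f⟩ '-'
                    = ⟨3, [c] ++ R.takeWhile PySem.Chars.isdigit, hi, f⟩ := by
                  simp [stepB, dashd, dashws]
                  try rfl
                cases hR3 : R3 with
                | nil =>
                    -- "ddd-": dead token
                    subst hR3
                    have htok : tokCoreT v (PySem.Chars.rstrip (c :: R)) = false := by
                      rw [show c :: R = (c :: R.takeWhile PySem.Chars.isdigit) ++ '-' :: [] by
                        conv_lhs => rw [hRsplit]
                        simp]
                      rw [rstrip_of_nonws _ (by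
                        intro y hy
                        rcases List.mem_append.mp hy with h1 | h1
                        · exact hbufws y h1
                        · simp at h1; rw [h1]; exact dashws)]
                      exact tokCoreT_false_right v _ [] hpredash (by simp [PySem.Chars.strIsdigit])
                    refine ⟨[c] ++ R.takeWhile PySem.Chars.isdigit, hi, ?_⟩
                    rw [htok]
                    have hlist : (c :: R) ++ [','] = [c] ++ (R.takeWhile PySem.Chars.isdigit
                        ++ (['-'] ++ [','])) := by
                      conv_lhs => rw [hRsplit]
                      simp
                    rw [hlist]
                    simp only [List.foldl_append, List.foldl_cons, List.foldl_nil, hstep0]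
                    rw [q1_digits v _ [c] hi f hds, hstep1]
                    simp [stepB, cdg]
                    try rfl
                | cons d R4 =>
                    have hdR : d ∈ R3 := by rw [hR3]; simp
                    have hdc : d ≠ ',' := fun h => hR3c (h ▸ hdR)
                    have hR4c : ',' ∉ R4 := fun hm => hR3c (by rw [hR3]; simp [hm])
                    by_cases hdd : PySem.Chars.isdigit d = true
                    · -- second number: state 4
                      have hstep2 : stepB v ⟨3, [c] ++ R.takeWhile PySem.Chars.isdigit, hi, f⟩ d
                          = ⟨4, [c] ++ R.takeWhile PySem.Chars.isdigit, [d], f⟩ := by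
                        simp [stepB, hdd]
                        try rfl
                      have hes : ∀ x ∈ R4.takeWhile PySem.Chars.isdigit, PySem.Chars.isdigit x = true :=
                        fun x hx => List.mem_takeWhile_imp hx
                      have hR5c : ',' ∉ R4.dropWhile PySem.Chars.isdigit :=
                        fun hm => hR4c ((List.dropWhile_sublist _).subset hm)
                      have hbuf2d : ∀ x ∈ d :: R4.takeWhile PySem.Chars.isdigit, PySem.Chars.isdigit x = true := by
                        intro x hx
                        rcases List.mem_cons.mp hx with rfl | hx
                        · exact hdd
                        · exact hes x hx
                      have hbuf2ws : ∀ x ∈ d :: R4.takeWhile PySem.Chars.isdigit, PySem.Chars.isspace x = false :=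
                        fun x hx => digit_not_space x (hbuf2d x hx)
                      cases hR5 : R4.dropWhile PySem.Chars.isdigit with
                      | nil =>
                          -- "a-b": range match
                          have hR4all : R4.takeWhile PySem.Chars.isdigit = R4 := by
                            conv_rhs => rw [← List.takeWhile_append_dropWhile (p := PySem.Chars.isdigit) (l := R4)]
                            rw [hR5, List.append_nil]
                          have hb2d := hbuf2d
                          have hb2w := hbuf2ws
                          rw [hR4all] at hb2d hb2w
                          have htok : tokCoreT v (PySem.Chars.rstrip (c :: R))
                              = (decide (bInt (c :: R.takeWhile PySem.Chars.isdigit) ≤ v)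
                                && decide (v ≤ bInt (d :: R4.takeWhile PySem.Chars.isdigit))) := by
                            rw [hR4all]
                            rw [show c :: R = (c :: R.takeWhile PySem.Chars.isdigit) ++ '-' :: (d :: R4) by
                              conv_lhs => rw [hRsplit, hR3]
                              simp]
                            rw [rstrip_of_nonws _ (by
                              intro y hy
                              rcases List.mem_append.mp hy with h1 | h1
                              · exact hbufws y h1
                              · rcases List.mem_cons.mp h1 with rfl | h1
                                · exact dashws
                                · exact hb2w y h1)]
                            rw [tokCoreT_range v _ _ (by simp) (by simp) hbufd hb2d]
                            rfl
                          refine ⟨[c] ++ R.takeWhile PySem.Chars.isdigit,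
                            [d] ++ R4.takeWhile PySem.Chars.isdigit, ?_⟩
                          rw [htok]
                          have hlist : (c :: R) ++ [','] = [c] ++ (R.takeWhile PySem.Chars.isdigit
                              ++ (['-'] ++ ([d] ++ (R4.takeWhile PySem.Chars.isdigit ++ [','])))) := by
                            conv_lhs => rw [hRsplit, hR3, ← hR4all]
                            simp
                          rw [hlist]
                          simp only [List.foldl_append, List.foldl_cons, List.foldl_nil, hstep0]
                          rw [q1_digits v _ [c] hi f hds, hstep1, hstep2,
                            q4_digits v _ _ [d] f hes]
                          simp [stepB, cdg, cws]
                          try rfl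
                      | cons g R6 =>
                          have hgd : PySem.Chars.isdigit g = false := dropWhile_head_false _ R4 g R6 hR5
                          have hgR : g ∈ R4 := (List.dropWhile_sublist _).subset (by rw [hR5]; simp)
                          have hgc : g ≠ ',' := fun h => hR4c (h ▸ hgR)
                          have hR6c : ',' ∉ R6 := fun hm => hR5c (by rw [hR5]; simp [hm])
                          have hR4split : R4 = R4.takeWhile PySem.Chars.isdigit ++ g :: R6 := by
                            conv_lhs => rw [← List.takeWhile_append_dropWhile (p := PySem.Chars.isdigit) (l := R4)]
                            rw [hR5]
                          by_cases hgws : PySem.Chars.isspace g = true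
                          · -- whitespace after the second number: state 5
                            have hstep3 : stepB v ⟨4, [c] ++ R.takeWhile PySem.Chars.isdigit,
                                [d] ++ R4.takeWhile PySem.Chars.isdigit, f⟩ g
                                = ⟨5, [c] ++ R.takeWhile PySem.Chars.isdigit,
                                    [d] ++ R4.takeWhile PySem.Chars.isdigit, f⟩ := by
                              simp [stepB, hgd, hgws]
                              try rfl
                            have hw3 : ∀ x ∈ R6.takeWhile PySem.Chars.isspace, PySem.Chars.isspace x = true :=
                              fun x hx => List.mem_takeWhile_imp hx
                            have hR7c : ',' ∉ R6.dropWhile PySem.Chars.isspace :=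
                              fun hm => hR6c ((List.dropWhile_sublist _).subset hm)
                            cases hR7 : R6.dropWhile PySem.Chars.isspace with
                            | nil =>
                                -- "a-b  ": range match
                                have hR6all : R6.takeWhile PySem.Chars.isspace = R6 := by
                                  conv_rhs => rw [← List.takeWhile_append_dropWhile (p := PySem.Chars.isspace) (l := R6)]
                                  rw [hR7, List.append_nil]
                                have hR6ws : ∀ x ∈ R6, PySem.Chars.isspace x = true := by
                                  rw [← hR6all]; exact hw3
                                have htok : tokCoreT v (PySem.Chars.rstrip (c :: R))
                                    = (decide (bInt (c :: R.takeWhile PySem.Chars.isdigit) ≤ v)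
                                      && decide (v ≤ bInt (d :: R4.takeWhile PySem.Chars.isdigit))) := by
                                  rw [show c :: R = ((c :: R.takeWhile PySem.Chars.isdigit)
                                      ++ '-' :: (d :: R4.takeWhile PySem.Chars.isdigit)) ++ (g :: R6) by
                                    conv_lhs => rw [hRsplit, hR3, hR4split]
                                    simp]
                                  rw [rstrip_append_ws _ _ (by
                                    intro y hy
                                    rcases List.mem_cons.mp hy with rfl | hy
                                    · exact hgws
                                    · exact hR6ws y hy)]
                                  rw [rstrip_of_nonws _ (by
                                    intro y hy
                                    rcases List.mem_append.mp hy with h1 | h1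
                                    · exact hbufws y h1
                                    · rcases List.mem_cons.mp h1 with rfl | h1
                                      · exact dashws
                                      · exact hbuf2ws y h1)]
                                  rw [tokCoreT_range v _ _ (by simp) (by simp) hbufd hbuf2d]
                                  rfl
                                refine ⟨[c] ++ R.takeWhile PySem.Chars.isdigit,
                                  [d] ++ R4.takeWhile PySem.Chars.isdigit, ?_⟩
                                rw [htok]
                                have hlist : (c :: R) ++ [','] = [c] ++ (R.takeWhile PySem.Chars.isdigit
                                    ++ (['-'] ++ ([d] ++ (R4.takeWhile PySem.Chars.isdigit
                                      ++ ([g] ++ (R6 ++ [','])))))) := by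
                                  conv_lhs => rw [hRsplit, hR3, hR4split]
                                  simp
                                rw [hlist]
                                simp only [List.foldl_append, List.foldl_cons, List.foldl_nil, hstep0]
                                rw [q1_digits v _ [c] hi f hds, hstep1, hstep2,
                                  q4_digits v _ _ [d] f hes, hstep3, q5_ws v R6 _ _ f hR6ws]
                                simp [stepB, cws]
                                try rfl
                            | cons y R8 =>
                                -- junk after trailing whitespace: dead token
                                have hyws : PySem.Chars.isspace y = false := dropWhile_head_false _ R6 y R8 hR7
                                have hyR : y ∈ R6 := (List.dropWhile_sublist _).subset (by rw [hR7]; simp)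
                                have hyc : y ≠ ',' := fun h => hR6c (h ▸ hyR)
                                have hR8c : ',' ∉ R8 := fun hm => hR7c (by rw [hR7]; simp [hm])
                                have hR6split : R6 = R6.takeWhile PySem.Chars.isspace ++ y :: R8 := by
                                  conv_lhs => rw [← List.takeWhile_append_dropWhile (p := PySem.Chars.isspace) (l := R6)]
                                  rw [hR7]
                                have htok : tokCoreT v (PySem.Chars.rstrip (c :: R)) = false := by
                                  rw [show c :: R = (c :: R.takeWhile PySem.Chars.isdigit)
                                      ++ '-' :: ((d :: (R4.takeWhile PySem.Chars.isdigit ++ [g]))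
                                        ++ (R6.takeWhile PySem.Chars.isspace ++ y :: R8)) by
                                    conv_lhs => rw [hRsplit, hR3, hR4split, hR6split]
                                    simp]
                                  rw [show ((c :: R.takeWhile PySem.Chars.isdigit)
                                      ++ '-' :: ((d :: (R4.takeWhile PySem.Chars.isdigit ++ [g]))
                                        ++ (R6.takeWhile PySem.Chars.isspace ++ y :: R8)))
                                      = ((c :: R.takeWhile PySem.Chars.isdigit)
                                        ++ '-' :: (d :: (R4.takeWhile PySem.Chars.isdigit ++ [g])))
                                        ++ (R6.takeWhile PySem.Chars.isspace ++ y :: R8) by simp]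
                                  rw [rstrip_append_ne _ _ (by
                                    rw [Ne, rstrip_eq_nil_iff]
                                    intro hall
                                    exact absurd (hall y (by simp)) (by simp [hyws]))]
                                  rw [show ((c :: R.takeWhile PySem.Chars.isdigit)
                                        ++ '-' :: (d :: (R4.takeWhile PySem.Chars.isdigit ++ [g])))
                                        ++ PySem.Chars.rstrip (R6.takeWhile PySem.Chars.isspace ++ y :: R8)
                                      = (c :: R.takeWhile PySem.Chars.isdigit)
                                        ++ '-' :: (d :: (R4.takeWhile PySem.Chars.isdigit
                                          ++ g :: PySem.Chars.rstrip (R6.takeWhile PySem.Chars.isspace ++ y :: R8))) by simp]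
                                  exact tokCoreT_false_right v _ _ hpredash
                                    (strIsdigit_false_of_mem g _ (by simp) hgd)
                                refine ⟨[c] ++ R.takeWhile PySem.Chars.isdigit,
                                  [d] ++ R4.takeWhile PySem.Chars.isdigit, ?_⟩
                                rw [htok]
                                have hlist : (c :: R) ++ [','] = [c] ++ (R.takeWhile PySem.Chars.isdigit
                                    ++ (['-'] ++ ([d] ++ (R4.takeWhile PySem.Chars.isdigit
                                      ++ ([g] ++ (R6.takeWhile PySem.Chars.isspace
                                        ++ ([y] ++ (R8 ++ [','])))))))) := by
                                  conv_lhs => rw [hRsplit, hR3, hR4split, hR6split]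
                                  simp
                                rw [hlist]
                                simp only [List.foldl_append, List.foldl_cons, List.foldl_nil, hstep0]
                                rw [q1_digits v _ [c] hi f hds, hstep1, hstep2,
                                  q4_digits v _ _ [d] f hes, hstep3, q5_ws v _ _ _ f hw3]
                                rw [show stepB v ⟨5, [c] ++ R.takeWhile PySem.Chars.isdigit,
                                    [d] ++ R4.takeWhile PySem.Chars.isdigit, f⟩ y
                                    = ⟨6, [c] ++ R.takeWhile PySem.Chars.isdigit,
                                        [d] ++ R4.takeWhile PySem.Chars.isdigit, f⟩ by
                                  simp [stepB, hyws, hyc]]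
                                rw [q6_absorb v R8 _ _ f hR8c]
                                simp [stepB]
                                try rfl
                          · -- junk directly after the second number: dead token
                            have htok : tokCoreT v (PySem.Chars.rstrip (c :: R)) = false := by
                              rw [show c :: R = ((c :: R.takeWhile PySem.Chars.isdigit)
                                  ++ '-' :: (d :: R4.takeWhile PySem.Chars.isdigit)) ++ (g :: R6) by
                                conv_lhs => rw [hRsplit, hR3, hR4split]
                                simp]
                              rw [rstrip_append_ne _ _ (by
                                rw [Ne, rstrip_eq_nil_iff]
                                intro hall
                                exact absurd (hall g (by simp)) (by simp [hgws]))]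
                              rw [rstrip_cons_of_ne g R6 (by
                                rw [Ne, rstrip_eq_nil_iff]
                                intro hall
                                exact absurd (hall g (by simp)) (by simp [hgws]))]
                              rw [show ((c :: R.takeWhile PySem.Chars.isdigit)
                                    ++ '-' :: (d :: R4.takeWhile PySem.Chars.isdigit))
                                    ++ g :: PySem.Chars.rstrip R6
                                  = (c :: R.takeWhile PySem.Chars.isdigit)
                                    ++ '-' :: (d :: (R4.takeWhile PySem.Chars.isdigit
                                      ++ g :: PySem.Chars.rstrip R6)) by simp]
                              exact tokCoreT_false_right v _ _ hpredash
                                (strIsdigit_false_of_mem g _ (by simp) hgd)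
                            refine ⟨[c] ++ R.takeWhile PySem.Chars.isdigit,
                              [d] ++ R4.takeWhile PySem.Chars.isdigit, ?_⟩
                            rw [htok]
                            have hlist : (c :: R) ++ [','] = [c] ++ (R.takeWhile PySem.Chars.isdigit
                                ++ (['-'] ++ ([d] ++ (R4.takeWhile PySem.Chars.isdigit
                                  ++ ([g] ++ (R6 ++ [','])))))) := by
                              conv_lhs => rw [hRsplit, hR3, hR4split]
                              simp
                            rw [hlist]
                            simp only [List.foldl_append, List.foldl_cons, List.foldl_nil, hstep0]
                            rw [q1_digits v _ [c] hi f hds, hstep1, hstep2,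
                              q4_digits v _ _ [d] f hes]
                            rw [show stepB v ⟨4, [c] ++ R.takeWhile PySem.Chars.isdigit,
                                [d] ++ R4.takeWhile PySem.Chars.isdigit, f⟩ g
                                = ⟨6, [c] ++ R.takeWhile PySem.Chars.isdigit,
                                    [d] ++ R4.takeWhile PySem.Chars.isdigit, f⟩ by
                              rw [Bool.not_eq_true] at hgws
                              simp [stepB, hgd, hgws, hgc]]
                            rw [q6_absorb v R6 _ _ f hR6c]
                            simp [stepB]
                            try rfl
                    · -- non-digit after the dash: dead token
                      rw [Bool.not_eq_true] at hdd
                      have htok : tokCoreT v (PySem.Chars.rstrip (c :: R)) = false := by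
                        rw [show c :: R = ((c :: R.takeWhile PySem.Chars.isdigit) ++ ['-']) ++ (d :: R4) by
                          conv_lhs => rw [hRsplit, hR3]
                          simp]
                        by_cases hnil : PySem.Chars.rstrip (d :: R4) = []
                        · rw [rstrip_append_ws _ _ ((rstrip_eq_nil_iff _).mp hnil)]
                          rw [rstrip_of_nonws _ (by
                            intro y hy
                            rcases List.mem_append.mp hy with h1 | h1
                            · exact hbufws y h1
                            · simp at h1; rw [h1]; exact dashws)]
                          rw [show (c :: R.takeWhile PySem.Chars.isdigit) ++ ['-']
                              = (c :: R.takeWhile PySem.Chars.isdigit) ++ '-' :: [] by simp]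
                          exact tokCoreT_false_right v _ [] hpredash (by simp [PySem.Chars.strIsdigit])
                        · rw [rstrip_append_ne _ _ hnil, rstrip_cons_of_ne d R4 hnil]
                          rw [show ((c :: R.takeWhile PySem.Chars.isdigit) ++ ['-'])
                                ++ d :: PySem.Chars.rstrip R4
                              = (c :: R.takeWhile PySem.Chars.isdigit)
                                ++ '-' :: (d :: PySem.Chars.rstrip R4) by simp]
                          exact tokCoreT_false_right v _ _ hpredash
                            (strIsdigit_false_of_mem d _ (by simp) hdd)
                      refine ⟨[c] ++ R.takeWhile PySem.Chars.isdigit, hi, ?_⟩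
                      rw [htok]
                      have hlist : (c :: R) ++ [','] = [c] ++ (R.takeWhile PySem.Chars.isdigit
                          ++ (['-'] ++ ([d] ++ (R4 ++ [','])))) := by
                        conv_lhs => rw [hRsplit, hR3]
                        simp
                      rw [hlist]
                      simp only [List.foldl_append, List.foldl_cons, List.foldl_nil, hstep0]
                      rw [q1_digits v _ [c] hi f hds, hstep1]
                      rw [show stepB v ⟨3, [c] ++ R.takeWhile PySem.Chars.isdigit, hi, f⟩ d
                          = ⟨6, [c] ++ R.takeWhile PySem.Chars.isdigit, hi, f⟩ by
                        simp [stepB, hdd, hdc]]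
                      rw [q6_absorb v R4 _ hi f hR4c]
                      simp [stepB]
                      try rfl
              · -- junk after the first number: dead token
                rw [Bool.not_eq_true] at hews
                have htok : tokCoreT v (PySem.Chars.rstrip (c :: R)) = false := by
                  rw [show c :: R = (c :: R.takeWhile PySem.Chars.isdigit) ++ (e :: R3) by
                    conv_lhs => rw [hRsplit]
                    simp]
                  rw [rstrip_append_ne _ _ (by
                    rw [Ne, rstrip_eq_nil_iff]
                    intro hall
                    exact absurd (hall e (by simp)) (by simp [hews]))]
                  rw [rstrip_cons_of_ne e R3 (by
                    rw [Ne, rstrip_eq_nil_iff]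
                    intro hall
                    exact absurd (hall e (by simp)) (by simp [hews]))]
                  exact tokCoreT_false_left v _ _ e hpredash hed hedash
                refine ⟨[c] ++ R.takeWhile PySem.Chars.isdigit, hi, ?_⟩
                rw [htok]
                have hlist : (c :: R) ++ [','] = [c] ++ (R.takeWhile PySem.Chars.isdigit
                    ++ ([e] ++ (R3 ++ [',']))) := by
                  conv_lhs => rw [hRsplit]
                  simp
                rw [hlist]
                simp only [List.foldl_append, List.foldl_cons, List.foldl_nil, hstep0]
                rw [q1_digits v _ [c] hi f hds]
                rw [show stepB v ⟨1, [c] ++ R.takeWhile PySem.Chars.isdigit, hi, f⟩ e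
                    = ⟨6, [c] ++ R.takeWhile PySem.Chars.isdigit, hi, f⟩ by
                  simp [stepB, hed, hews, hedash, hec]]
                rw [q6_absorb v R3 _ hi f hR3c]
                simp [stepB]
                try rfl
      · -- head is junk: the whole token is dead
        rw [Bool.not_eq_true] at hcd
        refine ⟨lo, hi, ?_⟩
        have hstep : stepB v ⟨0, lo, hi, f⟩ c = ⟨6, lo, hi, f⟩ := by
          simp [stepB, hcws, hcd, hcne]
          try rfl
        rw [List.cons_append, List.foldl_cons, hstep, runQ6 v R hRc]
        have htok : tokCoreT v (PySem.Chars.rstrip (c :: R)) = false := by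
          rw [rstrip_cons_of_ne c R hrne]
          by_cases hdash : c = '-'
          · subst hdash
            rw [tokCoreT, if_pos (isIn_dash_true _ (by simp))]
            have hp : pyPartitionDash ('-' :: PySem.Chars.rstrip R)
                = ([], PySem.Chars.rstrip R) := by simp [pyPartitionDash]
            rw [hp]
            simp [PySem.Chars.strIsdigit]
          · exact tokCoreT_false_left v [] (PySem.Chars.rstrip R) c (by simp) hcd hdash
        rw [htok]
        simp

-- ---- the per-segment theorem: the DFA over one comma-free segment computes tokM ----
theorem perSeg (v : Int) (seg : List Char) (h : ',' ∉ seg) :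
    ∀ (lo hi : List Char) (f : Bool), ∃ lo' hi',
      (seg ++ [',']).foldl (stepB v) ⟨0, lo, hi, f⟩ = ⟨0, lo', hi', f || tokM v seg⟩ := by
  intro lo hi f
  have hw0 : ∀ c ∈ seg.takeWhile PySem.Chars.isspace, PySem.Chars.isspace c = true :=
    fun c hc => List.mem_takeWhile_imp hc
  have hdecomp : seg ++ [','] = seg.takeWhile PySem.Chars.isspace
      ++ (seg.dropWhile PySem.Chars.isspace ++ [',']) := by
    rw [← List.append_assoc, List.takeWhile_append_dropWhile]
  rw [hdecomp, List.foldl_append, q0_ws v _ lo hi f hw0]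
  have hcm : ',' ∉ seg.dropWhile PySem.Chars.isspace :=
    fun hm => h ((List.dropWhile_sublist _).subset hm)
  have hh : ∀ c R, seg.dropWhile PySem.Chars.isspace = c :: R → PySem.Chars.isspace c = false :=
    fun c R hcr => dropWhile_head_false _ seg c R hcr
  obtain ⟨lo', hi', hrun⟩ := perSegCore v (seg.dropWhile PySem.Chars.isspace) hcm hh lo hi f
  exact ⟨lo', hi', by rw [hrun, tokM_eq_tokCoreT]⟩

-- ---- main decomposition over segments ----
theorem dfa_decomp (v : Int) : ∀ (cs p : List Char) (lo hi : List Char) (f : Bool), ',' ∉ p →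
    ((p ++ cs ++ [',']).foldl (stepB v) ⟨0, lo, hi, f⟩).found
      = (f || (splitAcc [] (p ++ cs)).any (tokM v)) := by
  intro cs
  induction cs with
  | nil =>
      intro p lo hi f hp
      obtain ⟨lo', hi', hrun⟩ := perSeg v p hp lo hi f
      rw [List.append_nil, hrun]
      rw [splitAcc_no_comma p hp []]
      simp
  | cons c cs' ih =>
      intro p lo hi f hp
      by_cases hc : c = ','
      · subst hc
        have hre : p ++ ',' :: cs' ++ [','] = (p ++ [',']) ++ (cs' ++ [',']) := by simp
        rw [hre, List.foldl_append]
        obtain ⟨lo', hi', hrun⟩ := perSeg v p hp lo hi f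
        rw [hrun]
        have := ih [] lo' hi' (f || tokM v p) (by simp)
        simp only [List.nil_append] at this
        rw [this]
        rw [splitAcc_append p cs' hp []]
        simp [Bool.or_assoc]
      · have hre : p ++ c :: cs' = (p ++ [c]) ++ cs' := by simp
        rw [hre]
        exact ih (p ++ [c]) lo hi f (by
          intro hm
          rcases List.mem_append.mp hm with h1 | h1
          · exact hp h1
          · simp at h1; exact hc h1.symm)

theorem main_eq (v : Int) (c : String) :
    matchPortLoop v ((PySem.Str.split? c ",").getD [])
      = ((c.toList ++ [',']).foldl (stepB v) ⟨0, [], [], false⟩).found := by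
  have hsplit : (PySem.Str.split? c ",").getD []
      = (PySem.Chars.splitOn c.toList [',']).map String.ofList := by
    have : (",").toList = [','] := by decide
    simp [PySem.Str.split?, PySem.Chars.split?, this]
  rw [hsplit, loopA]
  have h1 : ((PySem.Chars.splitOn c.toList [',']).map String.ofList).any
      (fun s => tokM v s.toList) = (PySem.Chars.splitOn c.toList [',']).any (tokM v) := by
    rw [List.any_map]
    simp only [Function.comp_def, String.toList_ofList]
  rw [h1, splitOn_comma]
  have h2 := dfa_decomp v c.toList [] [] [] false (by simp)
  simp only [List.nil_append] at h2
  rw [h2]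
  simp

-- ===== VERDICT (by name: the statement is the Claim_ definition above) =====
theorem match_port_py_spec : Claim_equal_match_port_py := by
  intro value condition _
  unfold Spec_match_port_py
  cases condition with
  | none => rfl
  | some c =>
      simp only [match_port_py, match_port_py_alt]
      split_ifs with h
      · rfl
      · exact main_eq value c
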